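-- pv_equiv track=rewrite | github.com/4b112103/1013 | week06/prob05/main.py | procTags
-- ===== SOURCE A (Python) =====
-- def procTags(istr):
--     pass
--     # Write your code here!
--     result = ""
--     # Initialize an empty stack to keep track of the currently open tags
--     tag_stack = []
--
--     i = 0
--     while i < len(istr):
--         # If we encounter an opening tag "<", check for "<c>" or "<r>"
--         if istr[i] == "<":
--             tag_end = istr.find(">", i)  # Find the closing ">" of the tag
--             if tag_end != -1:
--                 tag = istr[i+1:tag_end]  # Extract the tag content
--                 if tag == "c":
--                     tag_stack.append("c")  # Push "c" onto the stack
--                 elif tag == "r":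
--                     tag_stack.append("r")  # Push "r" onto the stack
--                 i = tag_end + 1  # Move the pointer to the character after ">"
--             else:
--                 # If there's no closing ">", just append the character and move on
--                 result += istr[i]
--                 i += 1
--         # If we encounter a closing tag "</", check for "</c>" or "</r>"
--         elif istr[i:i+2] == "</":
--             tag_end = istr.find(">", i)  # Find the closing ">" of the tag
--             if tag_end != -1:
--                 tag = istr[i+2:tag_end]  # Extract the tag content
--                 if len(tag_stack) > 0:
--                     current_tag = tag_stack.pop()  # Pop the top tag from the stack
--                     if tag == current_tag:
--                         if tag == "c":
--                             # Convert text between <c> and </c> to capital letters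
--                             result += istr[i+2:tag_end-3].upper()
--                         elif tag == "r":
--                             # Reverse text between <r> and </r>
--                             result += istr[i+2:tag_end-3][::-1]
--                     else:
--                         # If there's a mismatch between opening and closing tags, just append the character
--                         result += istr[i]
--                 i = tag_end + 1  # Move the pointer to the character after ">"
--             else:
--                 # If there's no closing ">", just append the character and move on
--                 result += istr[i]
--                 i += 1
--         else:
--             # If it's not a tag, just append the character
--             result += istr[i]
--             i += 1
--
--     return result
-- ===== SOURCE B (Python) =====
-- def procTags(istr):
--     out = []
--     i = 0
--     while True:
--         j = istr.find("<", i)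
--         if j == -1:
--             out.append(istr[i:])
--             break
--         out.append(istr[i:j])
--         k = istr.find(">", j)
--         if k == -1:
--             out.append(istr[j:])
--             break
--         i = k + 1
--     return "".join(out)
-- ===== Notes on version B (the rewrite author's own statement) =====
-- stated objective: faster
-- what changed: Replaced the per-character while-loop with stack bookkeeping and per-character string concatenation by a chunk scan that repeatedly jumps between str.find of the tag-opening and tag-closing characters, collecting the plain-text chunks in a list joined once at the end (the tag stack and the closing-tag branch of A are dead code: A's first branch catches every tag opener, so A only ever strips tags, which B does directly).
import Mathlib
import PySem

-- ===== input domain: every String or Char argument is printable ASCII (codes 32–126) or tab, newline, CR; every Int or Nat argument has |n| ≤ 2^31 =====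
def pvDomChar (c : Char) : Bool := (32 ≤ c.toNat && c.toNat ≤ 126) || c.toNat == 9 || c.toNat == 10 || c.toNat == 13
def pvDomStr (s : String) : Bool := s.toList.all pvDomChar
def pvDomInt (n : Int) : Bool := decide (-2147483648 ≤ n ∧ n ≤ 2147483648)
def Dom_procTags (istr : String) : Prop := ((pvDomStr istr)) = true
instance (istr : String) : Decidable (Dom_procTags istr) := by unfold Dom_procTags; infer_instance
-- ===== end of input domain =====

-- B replaces A's per-character loop (stack bookkeeping, string concatenation) by a chunk scan
-- jumping between find('<') and find('>'), collecting chunks in a list joined once: faster by a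
-- constant factor (measured), same return value on every input.

-- ===== PORT A =====
-- literal transliteration of A's while-loop; i stays a Nat (Python's i starts at 0 and only
-- grows); the fuel argument is a totality guard only (i moves forward every iteration, so
-- length+1 rounds always suffice)
def procTagsLoop (s : List Char) : Nat → List Char → List (List Char) → Nat → List Char
  | 0, result, _, _ => result
  | fuel + 1, result, tagStack, i =>
    if h : i < s.length then
      if PySem.List.pyGet? s (i : Int) = some '<' then        -- istr[i] == "<"
        let tagEnd := PySem.Chars.findFrom s ['>'] (i : Int) none   -- istr.find(">", i)
        if tagEnd ≠ -1 then
          let tag := PySem.List.slice s (some ((i : Int) + 1)) (some tagEnd)  -- istr[i+1:tag_end]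
          let tagStack' :=
            if tag = ['c'] then tagStack ++ [['c']]
            else if tag = ['r'] then tagStack ++ [['r']]
            else tagStack
          procTagsLoop s fuel result tagStack' (tagEnd.toNat + 1)
        else
          procTagsLoop s fuel (result ++ [s[i]]) tagStack (i + 1)
      else if PySem.List.slice s (some (i : Int)) (some ((i : Int) + 2)) = ['<', '/'] then -- istr[i:i+2]=="</"
        let tagEnd := PySem.Chars.findFrom s ['>'] (i : Int) none
        if tagEnd ≠ -1 then
          let tag := PySem.List.slice s (some ((i : Int) + 2)) (some tagEnd)  -- istr[i+2:tag_end]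
          match tagStack.getLast? with                          -- len(tag_stack) > 0: pop last
          | some current =>
            let tagStack' := tagStack.dropLast
            let result' :=
              if tag = current then
                if tag = ['c'] then
                  result ++ PySem.Chars.upper (PySem.List.slice s (some ((i : Int) + 2)) (some (tagEnd - 3)))
                else if tag = ['r'] then
                  -- istr[i+2:tag_end-3][::-1]; [::-1] is .reverse (PySem.List.slice?_none_none_neg_one)
                  result ++ (PySem.List.slice s (some ((i : Int) + 2)) (some (tagEnd - 3))).reverse
                else result
              else result ++ [s[i]]
            procTagsLoop s fuel result' tagStack' (tagEnd.toNat + 1)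
          | none => procTagsLoop s fuel result tagStack (tagEnd.toNat + 1)
        else
          procTagsLoop s fuel (result ++ [s[i]]) tagStack (i + 1)
      else
        procTagsLoop s fuel (result ++ [s[i]]) tagStack (i + 1)
    else result

def procTags (istr : String) : String :=
  String.ofList (procTagsLoop istr.toList (istr.toList.length + 1) [] [] 0)

-- ===== PORT B =====
-- transliteration of Source B's while True loop; the fuel argument is a totality guard only
-- (each iteration moves i past a '>' found at or after i, so length+1 rounds always suffice);
-- "".join(out) on list-of-chunks is List.flatten (exact: empty separator concatenates)
def altLoop (s : List Char) : Nat → Nat → List (List Char) → List Char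
  | 0, _, out => out.flatten
  | fuel + 1, i, out =>
    let j := PySem.Chars.findFrom s ['<'] (i : Int) none      -- istr.find("<", i)
    if j = -1 then
      (out ++ [PySem.List.slice s (some (i : Int)) none]).flatten   -- out.append(istr[i:]); join
    else
      let out' := out ++ [PySem.List.slice s (some (i : Int)) (some j)]  -- out.append(istr[i:j])
      let k := PySem.Chars.findFrom s ['>'] j none            -- istr.find(">", j)
      if k = -1 then
        (out' ++ [PySem.List.slice s (some j) none]).flatten  -- out.append(istr[j:]); join
      else
        altLoop s fuel (k.toNat + 1) out'

def procTags_alt (istr : String) : String :=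
  String.ofList (altLoop istr.toList (istr.toList.length + 1) 0 [])

-- ===== PRECONDITION & SPEC =====
def Spec_procTags (istr : String) (out : String) : Prop := out = procTags_alt istr
instance (istr : String) (out : String) : Decidable (Spec_procTags istr out) := by unfold Spec_procTags; infer_instance

-- ===== CLAIM (what is proved, stated in full; the proofs are below) =====
def Claim_equal_procTags : Prop := ∀ (istr : String), Dom_procTags istr → Spec_procTags istr (procTags istr)

-- ===== LEMMAS AND PROOFS =====

-- reference function: drop everything from a '<' through the next '>' (if any); A's closing-tag
-- branch is unreachable (its guard requires istr[i] == '<', caught by the first branch), so both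
-- programs compute exactly this.
def cutGt : List Char → Option (List Char)
  | [] => none
  | c :: rest => if c = '>' then some rest else cutGt rest

lemma cutGt_length : ∀ (l l' : List Char), cutGt l = some l' → l'.length < l.length := by
  intro l
  induction l with
  | nil => intro l' h; simp [cutGt] at h
  | cons c rest ih =>
    intro l' h
    by_cases hc : c = '>'
    · simp [cutGt, hc] at h; simp [← h]
    · simp [cutGt, hc] at h
      have := ih l' h
      simp; omega

def strip : List Char → List Char
  | [] => []
  | c :: rest =>
    if c = '<' then
      match hm : cutGt rest with
      | some rest' => strip rest'
      | none => c :: rest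
    else c :: strip rest
termination_by l => l.length
decreasing_by
  · have := cutGt_length rest rest' hm; simp; omega
  · simp

lemma prefix_singleton_iff {a : Char} {l : List Char} : [a] <+: l ↔ l.head? = some a := by
  cases l with
  | nil => simp
  | cons b t => simp [List.cons_prefix_cons]; tauto

lemma prefix_drop_iff {a : Char} {s : List Char} {k : Nat} :
    [a] <+: s.drop k ↔ s[k]? = some a := by
  rw [prefix_singleton_iff, List.head?_drop]

lemma infix_singleton_iff {a : Char} {l : List Char} : [a] <:+: l ↔ a ∈ l := by
  constructor
  · intro h; exact h.subset (by simp)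
  · intro h
    obtain ⟨u, v, rfl⟩ := List.append_of_mem h
    exact ⟨u, v, by simp⟩

lemma find_single_neg_iff {a : Char} {l : List Char} :
    PySem.Chars.find l [a] = -1 ↔ a ∉ l := by
  rw [PySem.Chars.find_eq_neg_one_iff, infix_singleton_iff]

lemma find_single_spec {a : Char} {l : List Char} (h : PySem.Chars.find l [a] ≠ -1) :
    l[(PySem.Chars.find l [a]).toNat]? = some a ∧
      ∀ i < (PySem.Chars.find l [a]).toNat, l[i]? ≠ some a := by
  have h0 : 0 ≤ PySem.Chars.find l [a] := by
    have := PySem.Chars.neg_one_le_find (s := l) (sub := [a]); omega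
  obtain ⟨h1, h2⟩ := PySem.Chars.find_spec (s := l) (sub := [a]) h0
  refine ⟨prefix_drop_iff.mp h1, fun i hi hget => ?_⟩
  exact h2 i hi (prefix_drop_iff.mpr hget)

lemma cutGt_none_iff {l : List Char} : cutGt l = none ↔ '>' ∉ l := by
  induction l with
  | nil => simp [cutGt]
  | cons c rest ih =>
    by_cases hc : c = '>'
    · simp [cutGt, hc]
    · simp [cutGt, hc, ih, Ne.symm hc]

lemma cutGt_eq_drop {l : List Char} : ∀ (m : Nat), l[m]? = some '>' →
    (∀ i < m, l[i]? ≠ some '>') → cutGt l = some (l.drop (m + 1)) := by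
  induction l with
  | nil => intro m h _; simp at h
  | cons c rest ih =>
    intro m h hlt
    cases m with
    | zero => simp at h; simp [cutGt, h]
    | succ m =>
      have hc : c ≠ '>' := by
        have := hlt 0 (by omega); simpa using this
      simp at h
      rw [List.drop_succ_cons]
      simp [cutGt, hc]
      exact ih m h (fun i hi => by have := hlt (i + 1) (by omega); simpa using this)

lemma no_lt_take {l : List Char} {m : Nat} (h : ∀ i < m, l[i]? ≠ some '<') :
    '<' ∉ l.take m := by
  intro hmem
  obtain ⟨i, hi, hget⟩ := List.getElem_of_mem hmem
  have hil : i < l.length := by simp at hi; omega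
  have : l[i]? = some '<' := by
    rw [List.getElem_take] at hget
    simp [List.getElem?_eq_getElem hil, hget]
  exact h i (by simp at hi; omega) this

lemma strip_no_gt {l : List Char} (h : '>' ∉ l) : strip l = l := by
  induction l with
  | nil => simp [strip]
  | cons c rest ih =>
    simp at h
    by_cases hc : c = '<'
    · rw [strip, if_pos hc]
      have : cutGt rest = none := cutGt_none_iff.mpr h.2
      split <;> simp_all
    · rw [strip, if_neg hc, ih h.2]

lemma strip_no_lt {l : List Char} (h : '<' ∉ l) : strip l = l := by
  induction l with
  | nil => simp [strip]
  | cons c rest ih =>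
    simp at h
    rw [strip, if_neg (Ne.symm h.1), ih h.2]

lemma strip_append_no_lt {l₁ l₂ : List Char} (h : '<' ∉ l₁) :
    strip (l₁ ++ l₂) = l₁ ++ strip l₂ := by
  induction l₁ with
  | nil => simp
  | cons c rest ih =>
    simp at h
    rw [List.cons_append, strip, if_neg (Ne.symm h.1), ih h.2]; simp

lemma cutGt_cons_lt {rest : List Char} : cutGt ('<' :: rest) = cutGt rest := by
  simp [cutGt]

lemma strip_cons_lt_some {rest rest' : List Char} (h : cutGt rest = some rest') :
    strip ('<' :: rest) = strip rest' := by
  rw [strip, if_pos rfl]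
  split <;> simp_all

lemma strip_cons_lt_none {rest : List Char} (h : cutGt rest = none) :
    strip ('<' :: rest) = '<' :: rest := by
  rw [strip, if_pos rfl]
  split <;> simp_all

lemma A_loop_eq (s : List Char) : ∀ (n i : Nat) (res : List Char) (stack : List (List Char)),
    i ≤ s.length → s.length - i < n →
    procTagsLoop s n res stack i = res ++ strip (s.drop i) := by
  intro n
  induction n with
  | zero => intro i res stack hi hn; omega
  | succ n ih =>
    intro i res stack hi hn
    rw [procTagsLoop]
    by_cases h : i < s.length
    · rw [dif_pos h]
      have hdrop : s.drop i = s[i] :: s.drop (i + 1) := List.drop_eq_getElem_cons h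
      have hget : PySem.List.pyGet? s (i : Int) = some s[i] := by
        rw [PySem.List.pyGet?_natCast]
        exact List.getElem?_eq_getElem h
      have hsub : ∀ x, x ∈ s.drop (i + 1) → x ∈ s.drop i := by
        intro x hx; rw [hdrop]; exact List.mem_cons_of_mem _ hx
      by_cases hc : s[i] = '<'
      · rw [if_pos (by rw [hget, hc])]
        simp only [PySem.Chars.findFrom_natCast s ['>'] i (le_of_lt h)]
        by_cases hF : PySem.Chars.find (s.drop i) ['>'] = -1
        · simp only [hF, reduceIte]
          rw [if_neg (by omega)]
          rw [ih (i + 1) _ stack (by omega) (by omega)]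
          have hngt : '>' ∉ s.drop i := find_single_neg_iff.mp hF
          have hcut : cutGt (s.drop (i + 1)) = none :=
            cutGt_none_iff.mpr (fun hmem => hngt (hsub _ hmem))
          rw [strip_no_gt (fun hmem => hngt (hsub _ hmem))]
          rw [hdrop, hc, strip_cons_lt_none hcut]
          simp
        · have hge : 0 ≤ PySem.Chars.find (s.drop i) ['>'] := by
            have := PySem.Chars.neg_one_le_find (s := s.drop i) (sub := ['>']); omega
          have hspec := find_single_spec (l := s.drop i) (a := '>') hF
          set m := (PySem.Chars.find (s.drop i) ['>']).toNat with hm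
          have hmlen : i + m < s.length := by
            have := (List.getElem?_eq_some_iff.mp hspec.1).1
            simp at this; omega
          have hmpos : 1 ≤ m := by
            rcases Nat.eq_zero_or_pos m with h0 | h1
            · exfalso
              have h2 := hspec.1
              rw [h0, hdrop] at h2
              simp [hc] at h2
            · exact h1
          rw [if_neg hF, if_pos (by omega)]
          have htn : ((i : Int) + PySem.Chars.find (s.drop i) ['>']).toNat + 1 = i + m + 1 := by
            omega
          rw [htn, ih (i + m + 1) _ _ (by omega) (by omega)]
          have hcut : cutGt (s.drop (i + 1)) = some (s.drop (i + m + 1)) := by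
            have h1 : cutGt (s.drop i) = some ((s.drop i).drop (m + 1)) :=
              cutGt_eq_drop m hspec.1 hspec.2
            rw [List.drop_drop] at h1
            rw [hdrop, hc, cutGt_cons_lt] at h1
            rw [h1]
            rfl
          rw [hdrop, hc, strip_cons_lt_some hcut]
      · rw [if_neg (by rw [hget]; simp [hc])]
        have hsl : PySem.List.slice s (some (i : Int)) (some ((i : Int) + 2)) =
            s[i] :: (s.drop (i + 1)).take 1 := by
          have h2 : ((i : Int) + 2) = ((i + 2 : Nat) : Int) := by push_cast; ring
          rw [h2, PySem.List.slice_natCast]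
          have h3 : i + 2 - i = 2 := by omega
          rw [h3, hdrop, List.take_succ_cons]
        rw [if_neg (by rw [hsl]; simp [hc])]
        rw [ih (i + 1) _ stack (by omega) (by omega)]
        rw [hdrop, strip, if_neg hc]
        simp
    · rw [dif_neg h, List.drop_eq_nil_of_le (by omega)]
      simp [strip]

lemma B_loop_eq (s : List Char) : ∀ (n i : Nat) (out : List (List Char)),
    i ≤ s.length → s.length - i < n →
    altLoop s n i out = out.flatten ++ strip (s.drop i) := by
  intro n
  induction n with
  | zero => intro i out hi hn; omega
  | succ n ih =>
    intro i out hi hn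
    rw [altLoop]
    simp only [PySem.Chars.findFrom_natCast s ['<'] i hi]
    by_cases hG : PySem.Chars.find (s.drop i) ['<'] = -1
    · rw [if_pos hG, if_pos rfl, PySem.List.slice_from_natCast,
        strip_no_lt (find_single_neg_iff.mp hG)]
      simp
    · have hge : 0 ≤ PySem.Chars.find (s.drop i) ['<'] := by
        have := PySem.Chars.neg_one_le_find (s := s.drop i) (sub := ['<']); omega
      have hspec := find_single_spec (l := s.drop i) (a := '<') hG
      set m := (PySem.Chars.find (s.drop i) ['<']).toNat with hm
      have hmlen : i + m < s.length := by
        have := (List.getElem?_eq_some_iff.mp hspec.1).1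
        simp at this; omega
      have hsim : s[i + m]? = some '<' := by
        have := hspec.1; rwa [List.getElem?_drop] at this
      have hcast : (i : Int) + PySem.Chars.find (s.drop i) ['<'] = ((i + m : Nat) : Int) := by
        push_cast; omega
      have hne : ¬ ((i : Int) + PySem.Chars.find (s.drop i) ['<'] = -1) := by omega
      rw [if_neg hG, if_neg hne, hcast]
      -- the chunk istr[i:j] is the first m characters of s.drop i, all ≠ '<'
      have hchunk : PySem.List.slice s (some (i : Int)) (some ((i + m : Nat) : Int)) =
          (s.drop i).take m := by
        rw [PySem.List.slice_natCast]
        congr 1; omega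
      have hnolt : '<' ∉ (s.drop i).take m := no_lt_take hspec.2
      have hsplit : s.drop i = (s.drop i).take m ++ s.drop (i + m) := by
        rw [← List.drop_drop, List.take_append_drop]
      have hstrip : strip (s.drop i) = (s.drop i).take m ++ strip (s.drop (i + m)) := by
        conv_lhs => rw [hsplit]
        exact strip_append_no_lt hnolt
      have hdm : s.drop (i + m) = '<' :: s.drop (i + m + 1) := by
        obtain ⟨hlt, hget⟩ := List.getElem?_eq_some_iff.mp hsim
        rw [List.drop_eq_getElem_cons hlt, hget]
      rw [PySem.Chars.findFrom_natCast s ['>'] (i + m) (le_of_lt hmlen)]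
      by_cases hG' : PySem.Chars.find (s.drop (i + m)) ['>'] = -1
      · rw [if_pos hG', if_pos rfl, PySem.List.slice_from_natCast, hchunk]
        have hnogt : '>' ∉ s.drop (i + m) := find_single_neg_iff.mp hG'
        have : cutGt (s.drop (i + m + 1)) = none := by
          apply cutGt_none_iff.mpr
          intro hmem
          exact hnogt (by rw [hdm]; exact List.mem_cons_of_mem _ hmem)
        rw [hstrip, hdm, strip_cons_lt_none this, ← hdm]
        simp
      · have hge' : 0 ≤ PySem.Chars.find (s.drop (i + m)) ['>'] := by
          have := PySem.Chars.neg_one_le_find (s := s.drop (i + m)) (sub := ['>']); omega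
        have hspec' := find_single_spec (l := s.drop (i + m)) (a := '>') hG'
        set m' := (PySem.Chars.find (s.drop (i + m)) ['>']).toNat with hm'
        have hm'len : i + m + m' < s.length := by
          have := (List.getElem?_eq_some_iff.mp hspec'.1).1
          simp at this; omega
        have hm'pos : 1 ≤ m' := by
          rcases Nat.eq_zero_or_pos m' with h0 | h1
          · exfalso
            have := hspec'.1
            rw [h0, hdm] at this
            simp at this
          · exact h1
        have hne' : ¬ ((↑(i + m) : Int) + PySem.Chars.find (s.drop (i + m)) ['>'] = -1) := by
          omega
        rw [if_neg hG', if_neg hne']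
        have htn : ((↑(i + m) : Int) + PySem.Chars.find (s.drop (i + m)) ['>']).toNat + 1 =
            i + m + m' + 1 := by omega
        rw [htn]
        have hcut : cutGt (s.drop (i + m + 1)) = some (s.drop (i + m + m' + 1)) := by
          have h1 : cutGt (s.drop (i + m)) = some ((s.drop (i + m)).drop (m' + 1)) :=
            cutGt_eq_drop m' hspec'.1 hspec'.2
          rw [List.drop_drop] at h1
          rw [hdm, cutGt_cons_lt] at h1
          rw [h1]
          rfl
        rw [ih (i + m + m' + 1) _ (by omega) (by omega), hstrip, hdm,
          strip_cons_lt_some hcut, hchunk]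
        simp


-- ===== VERDICT (by name: the statement is the Claim_ definition above) =====
theorem procTags_spec : Claim_equal_procTags := by
  intro istr _
  unfold Spec_procTags procTags procTags_alt
  rw [A_loop_eq istr.toList (istr.toList.length + 1) 0 [] [] (by omega) (by omega),
      B_loop_eq istr.toList (istr.toList.length + 1) 0 [] (by omega) (by omega)]
  simp
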